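-- pv_equiv track=rewrite | github.com/kiwoook/codingtest | 프로그래머스/대충_만든_자판.py | solution
-- ===== SOURCE A (Python) =====
-- def solution(keymap, targets):
--     answer = []
--     word_set = set([])
--     min_click_dict = {}
--
--     for arr in keymap:
--         for a in arr:
--             word_set.add(a)
--
--     for word in word_set:
--         min_click = 101
--         for i in range(len(keymap)):
--             tmp = keymap[i].find(word)
--             if tmp == -1:
--                 continue
--             if tmp <= min_click:
--                 min_click = tmp
--         min_click_dict[word] = min_click+1
--
--     for target in targets:
--         cnt = 0
--         for t in target:
--             if t in min_click_dict:
--                 cnt += min_click_dict[t]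
--             else:
--                 cnt = -1
--                 break
--         answer.append(cnt)
--
--     return answer
-- ===== SOURCE B (Python) =====
-- def press(best, target):
--     cnt = 0
--     for ch in target:
--         if ch not in best:
--             return -1
--         cnt += best[ch]
--     return cnt
--
--
-- def solution(keymap, targets):
--     best = {}
--     for row in keymap:
--         for i, ch in enumerate(row):
--             v = i + 1
--             if ch not in best or v < best[ch]:
--                 best[ch] = v
--     return [press(best, t) for t in targets]
-- ===== Notes on version B (the rewrite author's own statement) =====
-- stated objective: simpler
-- what changed: B drops A's word_set collection and per-character rescans of every keymap row via str.find, building the char->min-presses dict in one forward enumerate pass over the keymap; the per-target summing loop stays.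
-- intended difference: On targets whose characters all occur in the keymap but some character's earliest occurrence in every row is at index >= 102, A's '101' sentinel caps that character's cost at 102 presses and A returns the capped sum, while B returns the true minimal press count, which is the intended value. — e.g. on solution(["aaaaaaaaaaaaaaaaaaaaaaaaaaaaaaaaaaaaaaaaaaaaaaaaaaaaaaaaaaaaaaaaaaaaaaaaaaaaaaaaaaaaaaaaaaaaaaaaaaaaaab"], ["b"]): A returns [102], B returns [103]
import Mathlib
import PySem

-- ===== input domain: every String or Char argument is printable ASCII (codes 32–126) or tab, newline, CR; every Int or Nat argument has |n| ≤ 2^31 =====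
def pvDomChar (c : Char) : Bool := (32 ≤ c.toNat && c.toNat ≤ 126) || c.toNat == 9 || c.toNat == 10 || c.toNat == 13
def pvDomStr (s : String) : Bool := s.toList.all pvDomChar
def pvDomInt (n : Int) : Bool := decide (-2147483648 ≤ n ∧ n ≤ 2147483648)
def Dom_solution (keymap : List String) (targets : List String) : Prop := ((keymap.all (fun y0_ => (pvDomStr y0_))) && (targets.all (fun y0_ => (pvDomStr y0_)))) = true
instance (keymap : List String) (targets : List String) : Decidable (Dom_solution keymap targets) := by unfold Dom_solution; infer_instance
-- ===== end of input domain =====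

-- B replaces A's per-character scan of every keymap row with a single forward pass over the
-- keymap that keeps the minimum keypress count per character; B is simpler.
-- On keymap rows longer than 102 characters A's '101' sentinel caps the count (see D_solution).

-- ===== PORT A =====
-- cnt-accumulating loop over one target with break on a missing char (A's third loop body)
def pvACnt (d : PySem.Dict Char Int) : List Char → Int → Int
  | [], cnt => cnt
  | t :: ts, cnt =>
    match d.get? t with
    | some v => pvACnt d ts (cnt + v)
    | none => -1

-- word_set = set of all characters of keymap
def pvWordSet (keymap : List String) : PySem.Set Char :=
  keymap.foldl (fun s arr => arr.toList.foldl (fun s a => PySem.Set.add s a) s) PySem.Set.empty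

-- min_click_dict: for each word in word_set, scan all rows with .find
def pvMinClickDict (keymap : List String) : PySem.Dict Char Int :=
  (pvWordSet keymap).foldl (fun d word =>
    d.insert word
      ((PySem.List.pyRange 0 (PySem.List.len keymap) 1).foldl (fun mc i =>
        let tmp := PySem.Str.find (PySem.List.pyGetD keymap i "") (String.ofList [word])
        if tmp = -1 then mc else if tmp ≤ mc then tmp else mc) 101 + 1))
    PySem.Dict.empty

def solution (keymap : List String) (targets : List String) : List Int :=
  targets.foldl (fun answer target => answer ++ [pvACnt (pvMinClickDict keymap) target.toList 0]) []

-- ===== PORT B =====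
-- Source B's press helper: sum of best costs, -1 as soon as a char is missing
def pvPress (best : PySem.Dict Char Int) : List Char → Int → Int
  | [], cnt => cnt
  | ch :: rest, cnt =>
    match best.get? ch with
    | none => -1
    | some v => pvPress best rest (cnt + v)

-- loop body of Source B's build pass: keep the smaller of the stored and the new count
def pvBStep (best : PySem.Dict Char Int) (p : Int × Char) : PySem.Dict Char Int :=
  match best.get? p.2 with
  | none => best.insert p.2 (p.1 + 1)
  | some w => if p.1 + 1 < w then best.insert p.2 (p.1 + 1) else best

-- single forward pass: best[ch] = smallest i+1 over all occurrences of ch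
def pvBest (keymap : List String) : PySem.Dict Char Int :=
  keymap.foldl (fun best row => (PySem.List.enumerate row.toList 0).foldl pvBStep best)
    PySem.Dict.empty

def solution_alt (keymap : List String) (targets : List String) : List Int :=
  targets.map (fun t => pvPress (pvBest keymap) t.toList 0)

-- ===== PRECONDITION & SPEC =====
-- earliest keymap position of c: minimum over rows of the first-occurrence index
def pvMin (keymap : List String) (c : Char) : Option Nat :=
  (keymap.filterMap (fun r => r.toList.idxOf? c)).min?

-- On targets all of whose characters occur in keymap but some character's earliest keymap
-- position is index ≥ 102, A returns that target's count capped through its '101' sentinel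
-- (the char contributes 102 presses) while B returns the true minimal press count; B's value
-- is the intended one.
def D_solution (keymap : List String) (targets : List String) : Prop :=
  (targets.any (fun t =>
    t.toList.all (fun c => (pvMin keymap c).isSome) &&
    t.toList.any (fun c => decide (102 ≤ (pvMin keymap c).getD 0)))) = true
instance (keymap : List String) (targets : List String) : Decidable (D_solution keymap targets) := by
  unfold D_solution; infer_instance

def Spec_solution (keymap : List String) (targets : List String) (out : List Int) : Prop :=
  ¬ D_solution keymap targets → out = solution_alt keymap targets
instance (keymap : List String) (targets : List String) (out : List Int) : Decidable (Spec_solution keymap targets out) := by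
  unfold Spec_solution; infer_instance

def pvDiffWitness_solution : List String × List String :=
  (["aaaaaaaaaaaaaaaaaaaaaaaaaaaaaaaaaaaaaaaaaaaaaaaaaaaaaaaaaaaaaaaaaaaaaaaaaaaaaaaaaaaaaaaaaaaaaaaaaaaaaab"], ["b"])
def pvDiffWitnessOut_solution : (List Int) × (List Int) := ([102], [103])

-- ===== CLAIM (what is proved, stated in full; the proofs are below) =====
def Claim_unchanged_solution : Prop := ∀ (keymap : List String) (targets : List String), Dom_solution keymap targets → Spec_solution keymap targets (solution keymap targets)
def Claim_changed_solution : Prop := Dom_solution (pvDiffWitness_solution.1) (pvDiffWitness_solution.2) ∧ D_solution (pvDiffWitness_solution.1) (pvDiffWitness_solution.2) ∧ solution (pvDiffWitness_solution.1) (pvDiffWitness_solution.2) = pvDiffWitnessOut_solution.1 ∧ solution_alt (pvDiffWitness_solution.1) (pvDiffWitness_solution.2) = pvDiffWitnessOut_solution.2 ∧ pvDiffWitnessOut_solution.1 ≠ pvDiffWitnessOut_solution.2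

def Claim_exact_solution : Prop := ∀ (keymap : List String) (targets : List String), Dom_solution keymap targets → D_solution keymap targets → solution keymap targets ≠ solution_alt keymap targets

-- ===== LEMMAS AND PROOFS =====

-- proof-side helpers: first-occurrence index of c in a row, and the minimum over all rows
def pvMergeMin {α : Type} [LinearOrder α] : Option α → Option α → Option α
  | none, b => b
  | some a, none => some a
  | some a, some b => some (min a b)

def pvRowFirst : List Char → Char → Option Nat
  | [], _ => none
  | x :: xs, c => if x = c then some 0 else (pvRowFirst xs c).map (· + 1)

def pvMinR : List String → Char → Option Nat
  | [], _ => none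
  | r :: rest, c => pvMergeMin (pvRowFirst r.toList c) (pvMinR rest c)


theorem pvIdxOf?_eq_pvRowFirst (r : List Char) (c : Char) : r.idxOf? c = pvRowFirst r c := by
  induction r with
  | nil => rfl
  | cons x xs ih =>
    rw [List.idxOf?_cons, pvRowFirst]
    by_cases hx : x = c
    · rw [if_pos (by simpa using hx), if_pos hx]
    · rw [if_neg (by simpa using hx), if_neg hx, ih]

theorem pvMin_eq_pvMinR (keymap : List String) (c : Char) : pvMin keymap c = pvMinR keymap c := by
  induction keymap with
  | nil => rfl
  | cons r rest ih =>
    rw [pvMinR, ← ih, pvMin, pvMin, List.filterMap_cons, ← pvIdxOf?_eq_pvRowFirst]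
    cases hf : r.toList.idxOf? c with
    | none => rw [pvMergeMin]
    | some a =>
      rw [List.min?_cons]
      cases hm : (rest.filterMap (fun r => r.toList.idxOf? c)).min? with
      | none => simp [pvMergeMin]
      | some m => simp [pvMergeMin, hm]

theorem pvRowFirst_eq_none_iff (r : List Char) (c : Char) : pvRowFirst r c = none ↔ c ∉ r := by
  induction r with
  | nil => simp [pvRowFirst]
  | cons x xs ih =>
    by_cases hx : x = c <;> simp [pvRowFirst, hx, ih, eq_comm]
    exact fun _ h => hx h.symm

theorem pvRowFirst_eq_some_iff (r : List Char) (c : Char) : ∀ (n : Nat),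
    pvRowFirst r c = some n ↔ r[n]? = some c ∧ ∀ k < n, r[k]? ≠ some c := by
  induction r with
  | nil => intro n; simp [pvRowFirst]
  | cons x xs ih =>
    intro n
    by_cases hx : x = c
    · subst hx
      rw [pvRowFirst, if_pos rfl]
      cases n with
      | zero => simp
      | succ m =>
        constructor
        · intro h; exact absurd h (by simp)
        · rintro ⟨h1, h2⟩
          exact absurd (show (x :: xs)[0]? = some x by simp) (h2 0 (Nat.succ_pos m))
    · rw [pvRowFirst, if_neg hx]
      cases n with
      | zero =>
        constructor
        · intro h
          rcases Option.map_eq_some_iff.mp h with ⟨a, ha, hm⟩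
          omega
        · rintro ⟨h1, h2⟩
          simp at h1
          exact absurd h1 hx
      | succ m =>
        constructor
        · intro h
          rcases Option.map_eq_some_iff.mp h with ⟨a, ha, hm⟩
          have ham : a = m := by omega
          rw [ham] at ha
          rcases (ih m).mp ha with ⟨h1, h2⟩
          refine ⟨by simpa using h1, ?_⟩
          intro k hk
          cases k with
          | zero => simp only [List.getElem?_cons_zero]; exact fun h' => hx (by simpa using h')
          | succ k' => simpa using h2 k' (by omega)
        · rintro ⟨h1, h2⟩
          have hxs : pvRowFirst xs c = some m := by
            apply (ih m).mpr
            refine ⟨by simpa using h1, ?_⟩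
            intro k hk
            simpa using h2 (k + 1) (by omega)
          rw [hxs]; simp

theorem pvSingletonInfix (c : Char) (r : List Char) : [c] <:+: r ↔ c ∈ r := by
  constructor
  · intro h; exact List.singleton_sublist.mp h.sublist
  · intro h; obtain ⟨s, t, rfl⟩ := List.append_of_mem h; exact ⟨s, t, by simp⟩

theorem pvSingletonPrefix (c : Char) (l : List Char) : [c] <+: l ↔ l.head? = some c := by
  cases l <;> simp [List.cons_prefix_cons, eq_comm]

theorem pvFind (r : List Char) (c : Char) :
    PySem.Chars.find r [c] = match pvRowFirst r c with | none => -1 | some n => (n : Int) := by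
  by_cases hc : c ∈ r
  · have h1 : PySem.Chars.find r [c] ≠ -1 := by
      rw [Ne, PySem.Chars.find_eq_neg_one_iff, pvSingletonInfix]
      exact fun h => h hc
    have h0 : 0 ≤ PySem.Chars.find r [c] := by
      have := PySem.Chars.neg_one_le_find r [c]; omega
    obtain ⟨hpre, hmin⟩ := PySem.Chars.find_spec h0
    have hfirst : pvRowFirst r c = some (PySem.Chars.find r [c]).toNat := by
      rw [pvRowFirst_eq_some_iff]
      constructor
      · rw [← List.head?_drop, ← pvSingletonPrefix]; exact hpre
      · intro k hk hcontra
        exact hmin k hk (by rw [pvSingletonPrefix, List.head?_drop]; exact hcontra)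
    rw [hfirst]
    simp
    omega
  · have : pvRowFirst r c = none := (pvRowFirst_eq_none_iff r c).mpr hc
    rw [this]
    simp only
    rw [PySem.Chars.find_eq_neg_one_iff, pvSingletonInfix]
    exact fun h => hc h

-- pvMergeMin basic facts
theorem pvMergeMin_none_right {α : Type} [LinearOrder α] (a : Option α) : pvMergeMin a none = a := by
  cases a <;> rfl

theorem pvMergeMin_assoc {α : Type} [LinearOrder α] (a b c : Option α) :
    pvMergeMin (pvMergeMin a b) c = pvMergeMin a (pvMergeMin b c) := by
  cases a <;> cases b <;> cases c <;> simp [pvMergeMin, min_assoc]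

theorem pvMergeMin_absorb (b : Int) (o : Option Int) (h : ∀ y ∈ o, b ≤ y) :
    pvMergeMin (some b) o = some b := by
  cases o with
  | none => rfl
  | some y => simp [pvMergeMin, min_eq_left (h y rfl)]

theorem pvMergeMin_map_add_one (o₁ o₂ : Option Nat) :
    (pvMergeMin o₁ o₂).map (fun (n : Nat) => (n : Int) + 1) =
      pvMergeMin (o₁.map (fun (n : Nat) => (n : Int) + 1)) (o₂.map (fun (n : Nat) => (n : Int) + 1)) := by
  cases o₁ with
  | none => cases o₂ <;> rfl
  | some a =>
    cases o₂ with
    | none => rfl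
    | some b =>
      simp only [pvMergeMin, Option.map_some, Option.some.injEq]
      rw [Nat.cast_min, ← min_add_add_right]

theorem pvMinR_eq_none_iff (keymap : List String) (c : Char) :
    pvMinR keymap c = none ↔ ∀ r ∈ keymap, c ∉ r.toList := by
  induction keymap with
  | nil => simp [pvMinR]
  | cons r rest ih =>
    simp only [pvMinR, List.mem_cons]
    constructor
    · intro h
      have h1 : pvRowFirst r.toList c = none ∧ pvMinR rest c = none := by
        cases ha : pvRowFirst r.toList c with
        | none =>
          cases hb : pvMinR rest c with
          | none => exact ⟨rfl, rfl⟩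
          | some v => rw [ha, hb] at h; exact absurd h (by simp [pvMergeMin])
        | some u =>
          cases hb : pvMinR rest c with
          | none => rw [ha, hb] at h; exact absurd h (by simp [pvMergeMin])
          | some v => rw [ha, hb] at h; exact absurd h (by simp [pvMergeMin])
      rintro r' (rfl | hr')
      · exact (pvRowFirst_eq_none_iff _ c).mp h1.1
      · exact (ih.mp h1.2) r' hr'
    · intro h
      have h1 : pvRowFirst r.toList c = none := (pvRowFirst_eq_none_iff _ c).mpr (h r (Or.inl rfl))
      have h2 : pvMinR rest c = none := ih.mpr (fun r' hr' => h r' (Or.inr hr'))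
      rw [h1, h2]
      rfl

-- ===== A-side characterisation =====

theorem pvWordSet_eq (keymap : List String) :
    pvWordSet keymap = PySem.Set.ofList (keymap.flatMap (fun r => r.toList)) := by
  rw [PySem.Set.ofList_eq_foldl, List.foldl_flatMap]
  rfl

theorem pvMem_wordSet (keymap : List String) (c : Char) :
    c ∈ pvWordSet keymap ↔ pvMinR keymap c ≠ none := by
  rw [pvWordSet_eq, PySem.Set.mem_ofList, Ne, pvMinR_eq_none_iff]
  simp [List.mem_flatMap]

theorem pvDictFoldFresh (val : Char → Int) (ws : List Char) (d : PySem.Dict Char Int) (c : Char)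
    (hnd : ws.Nodup) (hd : ∀ w ∈ ws, d.get? w = none) :
    (ws.foldl (fun d w => d.insert w (val w)) d).get? c =
      if c ∈ ws then some (val c) else d.get? c := by
  induction ws generalizing d with
  | nil => simp
  | cons w ws ih =>
    simp only [List.foldl_cons]
    have hw : w ∉ ws := (List.nodup_cons.mp hnd).1
    rw [ih (d.insert w (val w)) (List.nodup_cons.mp hnd).2]
    · by_cases hc : c ∈ ws
      · rw [if_pos hc, if_pos (List.mem_cons_of_mem _ hc)]
      · rw [if_neg hc, PySem.Dict.get?_insert]
        by_cases hcw : c = w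
        · rw [if_pos hcw, if_pos (by simp [hcw]), hcw]
        · rw [if_neg hcw, if_neg (by simp [hcw, hc])]
    · intro w' hw'
      rw [PySem.Dict.get?_insert]
      rw [if_neg (by rintro rfl; exact hw hw'), hd w' (List.mem_cons_of_mem _ hw')]

theorem pvAFoldRows (c : Char) (rows : List String) (mc : Int) :
    rows.foldl (fun mc r =>
      let tmp := PySem.Str.find r (String.ofList [c])
      if tmp = -1 then mc else if tmp ≤ mc then tmp else mc) mc
    = match pvMinR rows c with
      | none => mc
      | some m => min mc (m : Int) := by
  induction rows generalizing mc with
  | nil => simp [pvMinR]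
  | cons r rest ih =>
    simp only [List.foldl_cons]
    have hfind : PySem.Str.find r (String.ofList [c])
        = match pvRowFirst r.toList c with | none => -1 | some n => (n : Int) := by
      simpa using pvFind r.toList c
    cases ha : pvRowFirst r.toList c with
    | none =>
      have hstep : (let tmp := PySem.Str.find r (String.ofList [c])
          if tmp = -1 then mc else if tmp ≤ mc then tmp else mc) = mc := by
        rw [hfind, ha]
        show (if (-1 : Int) = -1 then mc else if (-1 : Int) ≤ mc then (-1 : Int) else mc) = mc
        rw [if_pos rfl]
      rw [hstep, ih]
      simp only [pvMinR, ha, pvMergeMin]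
    | some n =>
      have hstep : (let tmp := PySem.Str.find r (String.ofList [c])
          if tmp = -1 then mc else if tmp ≤ mc then tmp else mc) = min mc (n : Int) := by
        rw [hfind, ha]
        show (if ((n : Int)) = -1 then mc else if ((n : Int)) ≤ mc then ((n : Int)) else mc)
          = min mc (n : Int)
        rw [if_neg (by omega)]
        rcases le_or_gt ((n : Int)) mc with h | h
        · rw [if_pos h, min_eq_right h]
        · rw [if_neg (by omega), min_eq_left (le_of_lt h)]
      rw [hstep, ih]
      simp only [pvMinR, ha]
      cases hb : pvMinR rest c with
      | none => simp [pvMergeMin]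
      | some v => simp only [pvMergeMin, Option.map_some]; rw [Nat.cast_min, ← min_assoc]

theorem pvMinClickDict_get? (keymap : List String) (c : Char) :
    (pvMinClickDict keymap).get? c = (pvMinR keymap c).map (fun (m : Nat) => min 101 (m : Int) + 1) := by
  unfold pvMinClickDict
  have hnd : (pvWordSet keymap).Nodup := by
    rw [pvWordSet_eq]; exact PySem.Set.nodup_ofList _
  rw [pvDictFoldFresh _ _ _ _ hnd (fun w _ => by simp)]
  rw [PySem.List.foldl_pyRange_zero_pyGetD keymap ""
    (fun mc r =>
      let tmp := PySem.Str.find r (String.ofList [c])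
      if tmp = -1 then mc else if tmp ≤ mc then tmp else mc) 101]
  by_cases hc : c ∈ pvWordSet keymap
  · rw [if_pos hc]
    have := (pvMem_wordSet keymap c).mp hc
    cases hm : pvMinR keymap c with
    | none => exact absurd hm this
    | some m =>
      rw [pvAFoldRows, hm]
      simp [min_comm]
  · rw [if_neg hc]
    have : pvMinR keymap c = none := by
      by_contra h; exact hc ((pvMem_wordSet keymap c).mpr h)
    simp [this]

-- ===== B-side characterisation =====

theorem pvBStep_get? (d : PySem.Dict Char Int) (j : Int) (x c : Char) :
    (pvBStep d (j, x)).get? c =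
      if x = c then pvMergeMin (d.get? c) (some (j + 1)) else d.get? c := by
  unfold pvBStep
  by_cases hx : x = c
  · subst hx
    rw [if_pos rfl]
    cases hd : d.get? x with
    | none => simp [hd, PySem.Dict.get?_insert, pvMergeMin]
    | some w =>
      simp only [hd]
      split_ifs with hlt
      · rw [PySem.Dict.get?_insert, if_pos rfl]
        simp only [pvMergeMin]
        rw [min_eq_right (by omega)]
      · rw [hd]
        simp only [pvMergeMin]
        rw [min_eq_left (by omega)]
  · rw [if_neg hx]
    cases hd : d.get? x with
    | none =>
      simp only [hd]
      rw [PySem.Dict.get?_insert, if_neg (fun h => hx (Eq.symm h))]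
    | some w =>
      simp only [hd]
      split_ifs
      · rw [PySem.Dict.get?_insert, if_neg (fun h => hx h.symm)]
      · rfl

theorem pvBRow (r : List Char) (c : Char) (j : Int) (d : PySem.Dict Char Int) :
    ((PySem.List.enumerate r j).foldl pvBStep d).get? c
    = pvMergeMin (d.get? c) ((pvRowFirst r c).map (fun (n : Nat) => j + (n : Int) + 1)) := by
  induction r generalizing j d with
  | nil => simp [PySem.List.enumerate, pvRowFirst, pvMergeMin_none_right]
  | cons x xs ih =>
    rw [PySem.List.enumerate_cons, List.foldl_cons, ih (j + 1) (pvBStep d (j, x)),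
      pvBStep_get?]
    have habs : ∀ (b : Int), b ≤ j + 1 →
        pvMergeMin (some b) ((pvRowFirst xs c).map (fun (n : Nat) => (j + 1) + (n : Int) + 1))
          = some b := by
      intro b hb
      apply pvMergeMin_absorb
      intro y hy
      simp only [Option.mem_def, Option.map_eq_some_iff] at hy
      obtain ⟨n, -, rfl⟩ := hy
      omega
    by_cases hx : x = c
    · rw [if_pos hx]
      have hrow : pvRowFirst (x :: xs) c = some 0 := by rw [pvRowFirst, if_pos hx]
      rw [hrow, pvMergeMin_assoc, habs (j + 1) le_rfl]
      simp only [Option.map_some, Nat.cast_zero]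
      congr 2
      omega
    · rw [if_neg hx]
      have hrow : pvRowFirst (x :: xs) c = (pvRowFirst xs c).map (· + 1) := by
        rw [pvRowFirst, if_neg hx]
      rw [hrow, Option.map_map]
      congr 1
      apply Option.map_congr
      intro n _
      simp only [Function.comp_apply]
      push_cast
      ring

theorem pvBDictRows (rows : List String) (c : Char) (d : PySem.Dict Char Int) :
    (rows.foldl (fun best row => (PySem.List.enumerate row.toList 0).foldl pvBStep best) d).get? c
    = pvMergeMin (d.get? c) ((pvMinR rows c).map (fun (n : Nat) => (n : Int) + 1)) := by
  induction rows generalizing d with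
  | nil => simp [pvMinR, pvMergeMin_none_right]
  | cons r rest ih =>
    rw [List.foldl_cons, ih, pvBRow, pvMergeMin_assoc]
    simp only [pvMinR]
    rw [pvMergeMin_map_add_one]
    congr 1
    congr 1
    simp only [zero_add]

theorem pvBest_get? (keymap : List String) (c : Char) :
    (pvBest keymap).get? c = (pvMinR keymap c).map (fun (n : Nat) => (n : Int) + 1) := by
  unfold pvBest
  rw [pvBDictRows]
  simp [pvMergeMin]

-- ===== per-target lemmas =====

theorem pvACnt_congr (d1 d2 : PySem.Dict Char Int) (t : List Char)
    (h : ∀ c ∈ t, d1.get? c = d2.get? c) : ∀ cnt, pvACnt d1 t cnt = pvPress d2 t cnt := by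
  induction t with
  | nil => intro cnt; rfl
  | cons x xs ih =>
    intro cnt
    simp only [pvACnt, pvPress, h x (List.mem_cons_self)]
    cases d2.get? x with
    | none => rfl
    | some v => exact ih (fun c hc => h c (List.mem_cons_of_mem _ hc)) (cnt + v)

theorem pvACnt_neg (d : PySem.Dict Char Int) (t : List Char)
    (hex : ∃ c ∈ t, d.get? c = none) : ∀ cnt, pvACnt d t cnt = -1 := by
  induction t with
  | nil => simp at hex
  | cons x xs ih =>
    intro cnt
    simp only [pvACnt]
    cases hd : d.get? x with
    | none => rfl
    | some v =>
      obtain ⟨c, hc, hcn⟩ := hex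
      rcases List.mem_cons.mp hc with rfl | hc'
      · rw [hd] at hcn; exact absurd hcn (by simp)
      · exact ih ⟨c, hc', hcn⟩ (cnt + v)

theorem pvPress_neg (d : PySem.Dict Char Int) (t : List Char)
    (hex : ∃ c ∈ t, d.get? c = none) : ∀ cnt, pvPress d t cnt = -1 := by
  induction t with
  | nil => simp at hex
  | cons x xs ih =>
    intro cnt
    simp only [pvPress]
    cases hd : d.get? x with
    | none => rfl
    | some v =>
      obtain ⟨c, hc, hcn⟩ := hex
      rcases List.mem_cons.mp hc with rfl | hc'
      · rw [hd] at hcn; exact absurd hcn (by simp)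
      · exact ih ⟨c, hc', hcn⟩ (cnt + v)

theorem pvFoldlAppend (f : String → Int) (ts : List String) (acc : List Int) :
    ts.foldl (fun ans t => ans ++ [f t]) acc = acc ++ ts.map f := by
  induction ts generalizing acc with
  | nil => simp
  | cons t ts ih => simp [ih]

-- ===== VERDICT (by name: the statement is the Claim_ definition above) =====
theorem solution_spec : Claim_unchanged_solution := by
  intro keymap targets _
  unfold Spec_solution
  intro hD
  unfold solution solution_alt
  rw [pvFoldlAppend (fun target => pvACnt (pvMinClickDict keymap) target.toList 0) targets []]
  rw [List.nil_append]
  apply List.map_congr_left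
  intro t ht
  have hDt : ¬ ((t.toList.all (fun c => (pvMinR keymap c).isSome)) = true ∧
      (t.toList.any (fun c => decide (102 ≤ (pvMinR keymap c).getD 0))) = true) := by
    intro ⟨h1, h2⟩
    apply hD
    unfold D_solution
    rw [List.any_eq_true]
    refine ⟨t, ht, ?_⟩
    rw [Bool.and_eq_true]
    simp only [pvMin_eq_pvMinR]
    exact ⟨h1, h2⟩
  by_cases hall : ∀ c ∈ t.toList, (pvMinR keymap c).isSome
  · have hsmall : ∀ c ∈ t.toList, ¬ (102 ≤ (pvMinR keymap c).getD 0) := by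
      intro c hc h102
      exact hDt ⟨List.all_eq_true.mpr (fun c' hc' => by simpa using hall c' hc'),
        List.any_eq_true.mpr ⟨c, hc, by simpa using h102⟩⟩
    apply pvACnt_congr
    intro c hc
    rw [pvMinClickDict_get?, pvBest_get?]
    cases hm : pvMinR keymap c with
    | none => rfl
    | some m =>
      have := hsmall c hc
      rw [hm] at this
      simp only [Option.getD_some] at this
      simp only [Option.map_some, Option.some.injEq]
      omega
  · push_neg at hall
    obtain ⟨c, hc, hnone⟩ := hall
    have hm : pvMinR keymap c = none := by
      cases h : pvMinR keymap c
      · rfl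
      · rw [h] at hnone; simp at hnone
    rw [pvACnt_neg _ _ ⟨c, hc, by rw [pvMinClickDict_get?, hm]; rfl⟩,
      pvPress_neg _ _ ⟨c, hc, by rw [pvBest_get?, hm]; rfl⟩]

set_option maxRecDepth 100000 in
theorem solution_changed : Claim_changed_solution := by
  unfold Claim_changed_solution; decide

theorem pvACnt_sum (d : PySem.Dict Char Int) (t : List Char)
    (h : ∀ c ∈ t, (d.get? c).isSome) :
    ∀ cnt, pvACnt d t cnt = cnt + (t.map (fun c => (d.get? c).getD 0)).sum := by
  induction t with
  | nil => intro cnt; simp [pvACnt]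
  | cons x xs ih =>
    intro cnt
    cases hx : d.get? x with
    | none => exact absurd (h x List.mem_cons_self) (by rw [hx]; simp)
    | some v =>
      simp only [pvACnt, hx]
      rw [ih (fun c hc => h c (List.mem_cons_of_mem _ hc))]
      simp [hx]
      ring

theorem pvPress_sum (d : PySem.Dict Char Int) (t : List Char)
    (h : ∀ c ∈ t, (d.get? c).isSome) :
    ∀ cnt, pvPress d t cnt = cnt + (t.map (fun c => (d.get? c).getD 0)).sum := by
  induction t with
  | nil => intro cnt; simp [pvPress]
  | cons x xs ih =>
    intro cnt
    cases hx : d.get? x with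
    | none => exact absurd (h x List.mem_cons_self) (by rw [hx]; simp)
    | some v =>
      simp only [pvPress, hx]
      rw [ih (fun c hc => h c (List.mem_cons_of_mem _ hc))]
      simp [hx]
      ring

theorem solution_tight : Claim_exact_solution := by
  intro keymap targets _ hd heq
  unfold D_solution at hd
  rw [List.any_eq_true] at hd
  obtain ⟨t, ht, hb⟩ := hd
  rw [Bool.and_eq_true] at hb
  obtain ⟨h1, h2⟩ := hb
  rw [List.all_eq_true] at h1
  rw [List.any_eq_true] at h2
  obtain ⟨cs, hcs, hcs2⟩ := h2
  have h1' : ∀ c ∈ t.toList, ∃ m, pvMinR keymap c = some m := by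
    intro c hc
    have := h1 c hc
    rw [pvMin_eq_pvMinR] at this
    cases hm : pvMinR keymap c with
    | none => rw [hm] at this; simp at this
    | some m => exact ⟨m, rfl⟩
  unfold solution solution_alt at heq
  rw [pvFoldlAppend (fun target => pvACnt (pvMinClickDict keymap) target.toList 0) targets [],
    List.nil_append] at heq
  have hpt := (List.map_eq_map_iff.mp heq) t ht
  have hA : ∀ c ∈ t.toList, ((pvMinClickDict keymap).get? c).isSome := by
    intro c hc
    obtain ⟨m, hm⟩ := h1' c hc
    rw [pvMinClickDict_get?, hm]
    simp
  have hB : ∀ c ∈ t.toList, ((pvBest keymap).get? c).isSome := by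
    intro c hc
    obtain ⟨m, hm⟩ := h1' c hc
    rw [pvBest_get?, hm]
    simp
  rw [pvACnt_sum _ _ hA 0, pvPress_sum _ _ hB 0] at hpt
  have hlt : (t.toList.map (fun c => (((pvMinClickDict keymap).get? c).getD 0))).sum <
      (t.toList.map (fun c => (((pvBest keymap).get? c).getD 0))).sum := by
    apply List.sum_lt_sum
    · intro c hc
      obtain ⟨m, hm⟩ := h1' c hc
      rw [pvMinClickDict_get?, pvBest_get?, hm]
      simp only [Option.map_some, Option.getD_some]
      have : min 101 ((m : Nat) : Int) ≤ ((m : Nat) : Int) := min_le_right _ _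
      omega
    · refine ⟨cs, hcs, ?_⟩
      obtain ⟨m, hm⟩ := h1' cs hcs
      rw [pvMin_eq_pvMinR, hm] at hcs2
      simp only [Option.getD_some, decide_eq_true_eq] at hcs2
      rw [pvMinClickDict_get?, pvBest_get?, hm]
      simp only [Option.map_some, Option.getD_some]
      have : min 101 ((m : Nat) : Int) = 101 := min_eq_left (by omega)
      omega
  omega
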